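-- pv_equiv track=rewrite | github.com/buhman/dreamcast | dreamcast2/regs/block_regs.py | split_integer
-- ===== SOURCE A (Python) =====
-- import string
--
-- def split_integer(s):
--     acc = []
--     for i, c in enumerate(s):
--         if c in string.digits:
--             acc.append(c)
--         else:
--             return int("".join(acc), 10), s[i:]
--     return int("".join(acc), 10), None
-- ===== SOURCE B (Python) =====
-- import string
--
-- def split_integer(s):
--     rest = s.lstrip(string.digits)
--     n = len(s) - len(rest)
--     return int(s[:n], 10), (rest or None)
-- ===== Notes on version B (the rewrite author's own statement) =====
-- stated objective: idiomatic
-- what changed: Replaces the indexed character-accumulation loop with a locate-then-split decomposition: lstrip(string.digits) finds where the digit run ends in one library scan, then one slice and `rest or None` build the result.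
import Mathlib
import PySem

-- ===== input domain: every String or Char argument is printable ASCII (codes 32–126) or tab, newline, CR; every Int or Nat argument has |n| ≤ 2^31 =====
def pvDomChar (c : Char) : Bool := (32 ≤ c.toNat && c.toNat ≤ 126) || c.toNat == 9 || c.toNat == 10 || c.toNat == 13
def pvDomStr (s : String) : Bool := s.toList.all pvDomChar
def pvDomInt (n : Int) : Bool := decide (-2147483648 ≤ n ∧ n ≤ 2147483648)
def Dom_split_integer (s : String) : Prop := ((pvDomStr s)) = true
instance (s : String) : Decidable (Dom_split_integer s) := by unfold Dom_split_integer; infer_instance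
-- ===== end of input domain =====

-- B replaces A's indexed character-accumulation loop with a locate-then-split decomposition
-- (lstrip the digit run, then one slice); same behaviour, more idiomatic.

-- ===== PORT A =====
-- string.digits membership test: c in "0123456789"
def pvDigits : List Char := "0123456789".toList

-- the for-loop of A: cs = remaining characters, i = current index, acc = digits collected;
-- int(x, 10) is PySem.Int.ofCharsBase? _ 10; where Python raises ValueError (acc empty) the
-- port returns the .getD 0 fallback — those inputs are excluded by Pre_split_integer.
def splitIntegerGo (s : String) : List Char → Nat → List Char → Int × Option String
  | [], _, acc => ((PySem.Int.ofCharsBase? acc 10).getD 0, none)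
  | c :: rest, i, acc =>
      if pvDigits.contains c then
        splitIntegerGo s rest (i + 1) (acc ++ [c])
      else
        ((PySem.Int.ofCharsBase? acc 10).getD 0, some (PySem.Str.slice s (some (i : Int)) none))

def split_integer (s : String) : Int × Option String :=
  splitIntegerGo s s.toList 0 []

-- ===== PORT B =====
-- s.lstrip(string.digits): drop the leading characters belonging to the set — exact, ported by
-- hand as dropWhile since PySem has no lstrip-with-chars primitive.
def split_integer_alt (s : String) : Int × Option String :=
  let rest : String := String.ofList (s.toList.dropWhile (fun c => pvDigits.contains c))
  let n : Nat := s.length - rest.length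
  ((PySem.Int.ofStrBase? (PySem.Str.slice s none (some (n : Int))) 10).getD 0,
   if rest = "" then none else some rest)

-- ===== PRECONDITION & SPEC =====
-- Python A raises ValueError (int of an empty digit run) exactly when s does not start with a digit.
def Pre_split_integer (s : String) : Prop := pvDigits.contains (s.toList.headD 'x') = true
instance (s : String) : Decidable (Pre_split_integer s) := by unfold Pre_split_integer; infer_instance

def pvWitness_split_integer : String := "42abc"

def Spec_split_integer (s : String) (out : Int × Option String) : Prop := out = split_integer_alt s
instance (s : String) (out : Int × Option String) : Decidable (Spec_split_integer s out) := by unfold Spec_split_integer; infer_instance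

-- ===== CLAIM (what is proved, stated in full; the proofs are below) =====
def Claim_equal_split_integer : Prop := ∀ (s : String), Dom_split_integer s → Pre_split_integer s → Spec_split_integer s (split_integer s)

-- ===== LEMMAS AND PROOFS =====

theorem splitIntegerGo_eq (s : String) (cs acc : List Char) (i : Nat)
    (hs : s.toList = acc ++ cs) (hi : i = acc.length)
    (hacc : ∀ c ∈ acc, pvDigits.contains c = true) :
    splitIntegerGo s cs i acc =
      ((PySem.Int.ofCharsBase? (acc ++ cs.takeWhile (fun c => pvDigits.contains c)) 10).getD 0,
       match cs.dropWhile (fun c => pvDigits.contains c) with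
       | [] => none
       | r => some (String.ofList r)) := by
  induction cs generalizing acc i with
  | nil => simp [splitIntegerGo]
  | cons c rest ih =>
      by_cases hc : pvDigits.contains c = true
      · have hm : c ∈ pvDigits := by simpa using hc
        have hstep := ih (acc ++ [c]) (i + 1)
          (by simpa using hs) (by simp [hi])
          (by intro x hx; rcases List.mem_append.mp hx with h | h
              · exact hacc x h
              · simpa [List.mem_singleton.mp h] using hc)
        simp [splitIntegerGo, hm, hstep]
      · have hm : c ∉ pvDigits := by simpa using hc
        have hslice : PySem.Str.slice s (some (i : Int)) none = String.ofList (c :: rest) := by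
          apply String.toList_inj.mp
          have h1 : (PySem.Str.slice s (some (i : Int)) none).toList = s.toList.drop i := by
            simp [PySem.Str.toList_slice, PySem.List.slice_from_natCast]
          rw [h1, hs, hi, List.drop_left]
          simp
        simp [splitIntegerGo, hm, hslice]

theorem split_integer_spec : Claim_equal_split_integer := by
  intro s _ _
  unfold Spec_split_integer split_integer split_integer_alt
  dsimp only
  have hmain := splitIntegerGo_eq s s.toList [] 0 (by simp) rfl (by simp)
  simp only [List.nil_append] at hmain
  rw [hmain]
  set t := s.toList.takeWhile (fun c => pvDigits.contains c) with ht
  set d := s.toList.dropWhile (fun c => pvDigits.contains c) with hd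
  have hsplit : t ++ d = s.toList := List.takeWhile_append_dropWhile
  have hlensum : t.length + d.length = s.toList.length := by
    rw [← hsplit, List.length_append]
  have hn : s.length - (String.ofList d).length = t.length := by
    rw [String.length_ofList]
    have hlen : s.length = s.toList.length := rfl
    omega
  have htake : PySem.Str.slice s none (some (t.length : Int)) = String.ofList t := by
    apply String.toList_inj.mp
    rw [PySem.Str.toList_slice]
    rw [PySem.Chars.slice_eq_listSlice, PySem.List.slice_to_natCast, String.toList_ofList]
    rw [← hsplit]
    exact List.take_left
  rw [hn, htake, PySem.Int.ofStrBase?_ofList]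
  cases d with
  | nil => simp
  | cons x xs =>
      have hne : String.ofList (x :: xs) ≠ "" := by
        intro h; simpa using String.toList_inj.mpr h
      simp [hne]
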